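-- pv_equiv track=rewrite | github.com/Ismailea4/ContainerVision-Marsa_Maroc | app_container/app2.py | check_digit_verification
-- ===== SOURCE A (Python) =====
-- def check_digit_verification(code):
--     """
--     Validates a code by checking if its check digit matches a calculated value.
--
--     The function assigns numerical values to letters, verifies the code format,
--     and computes a weighted sum to compare against the check digit.
--
--     Args:
--         code (dict): Dictionary containing a 'CN' key with an 11-character string.
--
--     Returns:
--         bool: True if the check digit is valid, False otherwise.
--     """
--     # Create numerical value assigned to each letter of the alphabet using code ascii
--     cst = 10
--     letter_values = {"A":10, "B":12, "C":13, "D":14, "E":15, "F":16, "G":17, "H":18, "I":19,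
--                      "J":20, "K":21, "L":23, "M":24, "N":25, "O":26, "P":27, "Q":28, "R":29,
--                      "S":30, "T":31, "U":32, "V":34, "W":35, "X":36, "Y":37, "Z":38}
--     """
--     for i in range(65, 91):
--         if (i - 65 + cst) % 11 == 0:
--             cst += 1
--         letter_values[chr(i)] = i - 65 + cst
--     """
--
--
--     # Verify if the first 4 are letters and the last 7 are digits
--     if len(code) == 11 and code[:4].isalpha() and code[4:].isdigit():
--         check_digit = int(code[-1])
--         i = 0
--         sum = 0
--         for char in code[:-1]:
--             if char.isalpha():
--                 sum += letter_values[char] * 2**i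
--             else:
--                 sum += int(char) * 2**i
--             i += 1
--         if sum % 11 == 10:
--             sum = 0
--
--         return check_digit == sum % 11
--     return False
-- ===== SOURCE B (Python) =====
-- def check_digit_verification(code):
--     # Horner evaluation (reverse pass, total = total*2 + value) and a closed-form
--     # letter value (skip multiples of 11) instead of the dict and 2**i powers.
--     if not (len(code) == 11 and code[:4].isalpha() and code[4:].isdigit()):
--         return False
--     if not all('A' <= c <= 'Z' for c in code[:4]):
--         return False  # lowercase letters: A crashes (KeyError); a validator should reject
--     total = 0
--     for ch in reversed(code[:-1]):
--         if ch.isalpha():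
--             k = ord(ch) - 55            # A -> 10, ..., Z -> 35
--             v = k + (k - 1) // 10       # skip the multiples of 11: A=10, B=12, ..., Z=38
--         else:
--             v = ord(ch) - 48
--         total = total * 2 + v
--     r = total % 11
--     if r == 10:
--         r = 0
--     return int(code[-1]) == r
-- ===== Notes on version B (the rewrite author's own statement) =====
-- stated objective: alternative
-- what changed: Replaces A's hard-coded letter-value dictionary with the closed-form value k + (k-1)//10 (k = ord-55) and the forward sum of value * 2**i with a reverse Horner pass (total = total*2 + value), so no power is ever computed and no dict is built.
-- outside the precondition, e.g. on check_digit_verification('abcd1234567'): A raises KeyError, B returns False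
-- crash fix: On well-formed 11-character codes whose first four letters contain a lowercase letter, A raises KeyError (its value dictionary only has uppercase keys); B rejects the code and returns False. — e.g. on check_digit_verification("abcd1234567"): A raises KeyError, B returns false
import Mathlib
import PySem

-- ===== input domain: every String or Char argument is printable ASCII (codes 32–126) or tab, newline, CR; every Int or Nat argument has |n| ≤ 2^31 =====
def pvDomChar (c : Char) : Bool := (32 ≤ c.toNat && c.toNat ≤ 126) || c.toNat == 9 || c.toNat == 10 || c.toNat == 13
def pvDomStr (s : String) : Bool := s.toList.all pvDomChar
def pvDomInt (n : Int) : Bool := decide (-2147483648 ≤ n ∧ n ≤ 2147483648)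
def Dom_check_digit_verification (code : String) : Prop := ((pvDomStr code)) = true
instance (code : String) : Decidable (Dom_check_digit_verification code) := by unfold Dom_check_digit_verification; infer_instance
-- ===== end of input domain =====

-- B replaces A's dict of letter values and forward `value * 2**i` loop by a closed-form
-- letter value and a reverse Horner pass (total = total*2 + value); same return value.

-- ===== PORT A =====
def pvLetterValues : PySem.Dict Char Int := PySem.Dict.ofList
  [('A',10),('B',12),('C',13),('D',14),('E',15),('F',16),('G',17),('H',18),('I',19),
   ('J',20),('K',21),('L',23),('M',24),('N',25),('O',26),('P',27),('Q',28),('R',29),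
   ('S',30),('T',31),('U',32),('V',34),('W',35),('X',36),('Y',37),('Z',38)]

-- letter_values[char] / int(char); the .getD 0 defaults are unreachable under Pre_ (KeyError excluded, digits parse)
def pvAVal (c : Char) : Int :=
  if PySem.Chars.isalpha c then (pvLetterValues.get? c).getD 0
  else (PySem.Int.ofChars? [c]).getD 0

-- `i = 0; sum = 0; for char in code[:-1]: sum += value * 2**i; i += 1`
def pvALoop : List Char → Nat → Int → Int
  | [], _, s => s
  | c :: rest, i, s => pvALoop rest (i + 1) (s + pvAVal c * 2 ^ i)

def check_digit_verification (code : String) : Bool :=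
  if PySem.Chars.len code.toList == 11 && PySem.Chars.strIsalpha (PySem.List.slice code.toList none (some 4))
      && PySem.Chars.strIsdigit (PySem.List.slice code.toList (some 4) none) then
    -- check_digit = int(code[-1]); in range and a digit under the guard
    let check_digit : Int := match PySem.List.pyGet? code.toList (-1) with
      | some c => (PySem.Int.ofChars? [c]).getD 0
      | none => 0
    let s := pvALoop (PySem.List.slice code.toList none (some (-1))) 0 0
    let s2 := if PySem.Int.mod s 11 = 10 then 0 else s
    check_digit == PySem.Int.mod s2 11
  else false

-- ===== PORT B =====
def pvBVal (c : Char) : Int :=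
  if PySem.Chars.isalpha c then
    ((c.toNat : Int) - 55) + PySem.Int.floordiv ((c.toNat : Int) - 55 - 1) 10
  else (c.toNat : Int) - 48

-- `for ch in reversed(code[:-1]): total = total*2 + v`
def pvHorner : List Char → Int → Int
  | [], t => t
  | c :: rest, t => pvHorner rest (t * 2 + pvBVal c)

def check_digit_verification_alt (code : String) : Bool :=
  if !(PySem.Chars.len code.toList == 11 && PySem.Chars.strIsalpha (PySem.List.slice code.toList none (some 4))
      && PySem.Chars.strIsdigit (PySem.List.slice code.toList (some 4) none)) then false
  else if !(PySem.List.slice code.toList none (some 4)).all (fun c => decide ('A' ≤ c) && decide (c ≤ 'Z')) then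
    false   -- lowercase letters: reject instead of A's KeyError
  else
    let total := pvHorner (PySem.List.slice code.toList none (some (-1))).reverse 0
    let r := PySem.Int.mod total 11
    let r2 := if r = 10 then 0 else r
    (match PySem.List.pyGet? code.toList (-1) with
      | some c => (PySem.Int.ofChars? [c]).getD 0
      | none => 0) == r2

-- ===== PRECONDITION & SPEC =====
-- Pre_ excludes ONLY the inputs on which A raises KeyError: a lowercase letter among the
-- first four characters of an otherwise well-formed 11-character code.
def Pre_check_digit_verification (code : String) : Prop :=
  (code.toList.length = 11 ∧ PySem.Chars.strIsalpha (code.toList.take 4) = true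
      ∧ PySem.Chars.strIsdigit (code.toList.drop 4) = true) →
    (code.toList.take 4).all (fun c => !PySem.Chars.islower c) = true
instance (code : String) : Decidable (Pre_check_digit_verification code) := by
  unfold Pre_check_digit_verification; infer_instance

def pvWitness_check_digit_verification : String := "CSQU3054383"

-- A raises KeyError on well-formed codes whose first four letters contain a lowercase one; B returns False.
def Raises_check_digit_verification (code : String) : Prop :=
  code.toList.length = 11 ∧ PySem.Chars.strIsalpha (code.toList.take 4) = true
    ∧ PySem.Chars.strIsdigit (code.toList.drop 4) = true
    ∧ (code.toList.take 4).any (fun c => PySem.Chars.islower c) = true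
instance (code : String) : Decidable (Raises_check_digit_verification code) := by
  unfold Raises_check_digit_verification; infer_instance
def pvRaiseWitness_check_digit_verification : String := "abcd1234567"
def pvRaiseWitnessOut_check_digit_verification : Bool := false

def Spec_check_digit_verification (code : String) (out : Bool) : Prop := out = check_digit_verification_alt code
instance (code : String) (out : Bool) : Decidable (Spec_check_digit_verification code out) := by unfold Spec_check_digit_verification; infer_instance

-- ===== CLAIM (what is proved, stated in full; the proofs are below) =====
def Claim_equal_check_digit_verification : Prop := ∀ (code : String), Dom_check_digit_verification code → Pre_check_digit_verification code → Spec_check_digit_verification code (check_digit_verification code)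
def Claim_raises_check_digit_verification : Prop := (∀ (code : String), Dom_check_digit_verification code → Raises_check_digit_verification code → ¬ Pre_check_digit_verification code) ∧ (Dom_check_digit_verification (pvRaiseWitness_check_digit_verification) ∧ Raises_check_digit_verification (pvRaiseWitness_check_digit_verification) ∧ check_digit_verification_alt (pvRaiseWitness_check_digit_verification) = pvRaiseWitnessOut_check_digit_verification)

-- ===== LEMMAS AND PROOFS =====

-- weighted sums Σ value(c_j)·2^j, written front-first
def pvWA : List Char → Int
  | [] => 0
  | c :: rest => pvAVal c + 2 * pvWA rest

def pvWB : List Char → Int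
  | [] => 0
  | c :: rest => pvBVal c + 2 * pvWB rest

lemma pvALoop_eq : ∀ (cs : List Char) (i : Nat) (s : Int),
    pvALoop cs i s = s + 2 ^ i * pvWA cs := by
  intro cs
  induction cs with
  | nil => intro i s; simp [pvALoop, pvWA]
  | cons c rest ih =>
    intro i s
    simp only [pvALoop, pvWA, ih, pow_succ]
    ring

lemma pvHorner_append (xs ys : List Char) (t : Int) :
    pvHorner (xs ++ ys) t = pvHorner ys (pvHorner xs t) := by
  induction xs generalizing t with
  | nil => simp [pvHorner]
  | cons c rest ih => simp [pvHorner, ih]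

lemma pvHorner_rev : ∀ (cs : List Char) (t : Int),
    pvHorner cs.reverse t = t * 2 ^ cs.length + pvWB cs := by
  intro cs
  induction cs with
  | nil => intro t; simp [pvHorner, pvWB]
  | cons c rest ih =>
    intro t
    simp only [List.reverse_cons, pvHorner_append, pvHorner, ih, pvWB,
      List.length_cons, pow_succ]
    ring

set_option maxRecDepth 8000 in
lemma pvVal_eq_of_lt128 : ∀ n ∈ List.range 128,
    ((!(PySem.Chars.isupper (Char.ofNat n) || PySem.Chars.isdigit (Char.ofNat n)))
      || (pvAVal (Char.ofNat n) == pvBVal (Char.ofNat n))) = true := by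
  decide

lemma pvToNat_lt128 (c : Char) (h : PySem.Chars.isupper c || PySem.Chars.isdigit c) :
    c.toNat < 128 := by
  simp only [PySem.Chars.isupper, PySem.Chars.isdigit, Bool.or_eq_true, Bool.and_eq_true,
    decide_eq_true_eq, Char.le_def] at h
  have hZ : ('Z'.val.toNat) = 90 := by decide
  have h9 : ('9'.val.toNat) = 57 := by decide
  rcases h with ⟨_, h2⟩ | ⟨_, h2⟩ <;>
    · have := UInt32.le_iff_toNat_le.mp h2
      simp only [Char.toNat]
      omega

lemma pvVal_eq (c : Char) (h : PySem.Chars.isupper c || PySem.Chars.isdigit c) :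
    pvAVal c = pvBVal c := by
  have h128 : c.toNat < 128 := pvToNat_lt128 c h
  have hc : Char.ofNat c.toNat = c := Char.ofNat_toNat c
  have := pvVal_eq_of_lt128 c.toNat (List.mem_range.mpr h128)
  rw [hc] at this
  rcases Bool.or_eq_true _ _ |>.mp this with h' | h'
  · rw [h] at h'; exact absurd h' (by simp)
  · exact eq_of_beq h'

lemma pvW_eq (cs : List Char) (h : ∀ c ∈ cs, PySem.Chars.isupper c || PySem.Chars.isdigit c) :
    pvWA cs = pvWB cs := by
  induction cs with
  | nil => rfl
  | cons c rest ih =>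
    simp only [pvWA, pvWB, pvVal_eq c (h c (List.mem_cons_self)),
      ih (fun x hx => h x (List.mem_cons_of_mem _ hx))]

-- ===== VERDICT (by name: the statement is the Claim_ definition above) =====
theorem check_digit_verification_spec : Claim_equal_check_digit_verification := by
  intro code _ hpre
  unfold Spec_check_digit_verification check_digit_verification check_digit_verification_alt
  have h4 : PySem.List.slice code.toList none (some 4) = code.toList.take 4 := by simp [pysem]
  have hd4 : PySem.List.slice code.toList (some 4) none = code.toList.drop 4 := by simp [pysem]
  have hm1 : PySem.List.slice code.toList none (some (-1)) = code.toList.dropLast :=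
    PySem.List.slice_to_neg_one code.toList
  simp only [h4, hd4, hm1, PySem.Chars.len_eq]
  cases hg : ((code.toList.length : Int) == 11 && PySem.Chars.strIsalpha (code.toList.take 4)
      && PySem.Chars.strIsdigit (code.toList.drop 4)) with
  | false => simp only [Bool.not_false, if_true, Bool.false_eq_true, if_false]
  | true =>
    simp only [Bool.not_true, Bool.false_eq_true, if_false, if_true]
    have hg' := hg
    simp only [Bool.and_eq_true, beq_iff_eq] at hg'
    obtain ⟨⟨hlen0, halpha⟩, hdig⟩ := hg'
    have hlen : code.toList.length = 11 := by exact_mod_cast hlen0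
    -- the characters: first four uppercase, the rest digits
    have hupper : ∀ c ∈ code.toList.take 4, PySem.Chars.isupper c = true := by
      intro c hcmem
      have hlow : PySem.Chars.islower c = false := by
        have := List.all_eq_true.mp (hpre ⟨hlen, halpha, hdig⟩) c hcmem
        simpa using this
      have halpha' : PySem.Chars.isalpha c = true := by
        simp only [PySem.Chars.strIsalpha, Bool.and_eq_true, List.all_eq_true] at halpha
        exact halpha.2 c hcmem
      simp only [PySem.Chars.isalpha, hlow, Bool.or_false] at halpha'
      exact halpha'
    have hdigit : ∀ c ∈ code.toList.drop 4, PySem.Chars.isdigit c = true := by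
      intro c hcmem
      simp only [PySem.Chars.strIsdigit, Bool.and_eq_true, List.all_eq_true] at hdig
      exact hdig.2 c hcmem
    have hok : ∀ c ∈ code.toList.dropLast,
        PySem.Chars.isupper c || PySem.Chars.isdigit c := by
      intro c hcmem
      have hmem : c ∈ code.toList := List.dropLast_subset _ hcmem
      rw [← List.take_append_drop 4 code.toList] at hmem
      rcases List.mem_append.mp hmem with h' | h'
      · simp [hupper c h']
      · simp [hdigit c h']
    have hall : (code.toList.take 4).all (fun c => decide ('A' ≤ c) && decide (c ≤ 'Z')) = true := by
      rw [List.all_eq_true]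
      intro c hcmem
      exact hupper c hcmem
    simp only [hall, Bool.not_true, Bool.false_eq_true, if_false]
    -- the two sums are equal
    have hsum : pvALoop code.toList.dropLast 0 0 = pvHorner code.toList.dropLast.reverse 0 := by
      rw [pvALoop_eq, pvHorner_rev, pvW_eq code.toList.dropLast hok]
      ring
    rw [hsum]
    by_cases h10 : PySem.Int.mod (pvHorner code.toList.dropLast.reverse 0) 11 = 10
    · simp only [h10, if_true]
      norm_num [PySem.Int.mod]
    · simp only [h10, if_false]

set_option maxRecDepth 100000 in
@[simp] theorem check_digit_verification_raises : Claim_raises_check_digit_verification := by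
  unfold Claim_raises_check_digit_verification
  constructor
  · intro code _ hr hpre
    obtain ⟨h1, h2, h3, hany⟩ := hr
    obtain ⟨c, hcmem, hclow⟩ := List.any_eq_true.mp hany
    have := List.all_eq_true.mp (hpre ⟨h1, h2, h3⟩) c hcmem
    simp only [Bool.not_eq_eq_eq_not, Bool.not_true] at this
    rw [this] at hclow
    exact absurd hclow (by simp)
  · exact ⟨by decide, by decide, by decide⟩
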